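-- pv_equiv track=rewrite | github.com/nauticalab/orcapod-python | src/orcapod/utils/arrow_utils.py | pylist_to_pydict
-- ===== SOURCE A (Python) =====
-- def pylist_to_pydict(pylist: list[dict]) -> dict:
--     """
--     Convert a list of dictionaries to a dictionary of lists (columnar format).
--
--     This function transforms row-based data (list of dicts) to column-based data
--     (dict of lists), similar to converting from records format to columnar format.
--     Missing keys in individual dictionaries are filled with None values.
--
--     Args:
--         pylist: List of dictionaries representing rows of data
--
--     Returns:
--         Dictionary where keys are column names and values are lists of column data
--
--     Example:
--         >>> data = [{'a': 1, 'b': 2}, {'a': 3, 'c': 4}]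
--         >>> pylist_to_pydict(data)
--         {'a': [1, 3], 'b': [2, None], 'c': [None, 4]}
--     """
--     result = {}
--     known_keys = set()
--     for i, d in enumerate(pylist):
--         known_keys.update(d.keys())
--         for k in known_keys:
--             result.setdefault(k, [None] * i).append(d.get(k, None))
--     return result
-- ===== SOURCE B (Python) =====
-- def pylist_to_pydict(pylist: list[dict]) -> dict:
--     keys = dict.fromkeys(k for d in pylist for k in d)
--     return {k: [d.get(k) for d in pylist] for k in keys}
-- ===== Notes on version B (the rewrite author's own statement) =====
-- stated objective: simpler
-- what changed: Replaces A's single row-wise pass that maintains known_keys and pads new columns with [None]*i by a two-phase columnar build: one pass collecting the ordered union of keys, then one column scan per key using d.get(k), so the padding logic disappears.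
import Mathlib
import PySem

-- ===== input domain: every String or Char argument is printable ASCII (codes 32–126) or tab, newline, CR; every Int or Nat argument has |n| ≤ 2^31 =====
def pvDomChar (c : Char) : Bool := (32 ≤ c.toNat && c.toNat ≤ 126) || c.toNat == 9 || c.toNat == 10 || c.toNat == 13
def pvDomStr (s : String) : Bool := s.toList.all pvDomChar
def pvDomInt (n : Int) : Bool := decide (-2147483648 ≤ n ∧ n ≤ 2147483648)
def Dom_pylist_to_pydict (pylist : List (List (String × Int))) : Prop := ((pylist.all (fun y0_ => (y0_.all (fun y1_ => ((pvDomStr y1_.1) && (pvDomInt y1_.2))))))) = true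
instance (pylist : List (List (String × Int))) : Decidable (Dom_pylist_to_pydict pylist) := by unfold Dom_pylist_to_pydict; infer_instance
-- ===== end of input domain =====

-- B replaces A's single row-wise pass (known_keys bookkeeping + [None]*i padding) by a
-- two-phase columnar build: collect the ordered union of keys, then one column scan per key
-- (objective: simpler). Equality of the association lists is proved; key order coincides
-- because both ports record keys in first-appearance order (Python compares dicts ignoring order).

-- ===== PORT A =====
-- one body of A's outer loop: known_keys.update(d.keys());
-- 'result.setdefault(k, [None]*i).append(d.get(k, None))' sets, as a value,
-- result[k] = result.get(k, [None]*i) + [d.get(k)], i.e. Dict.modify with default [None]*i.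
def stepA (st : PySem.Dict String (List (Option Int)) × PySem.Set String)
    (p : Int × List (String × Int)) :
    PySem.Dict String (List (Option Int)) × PySem.Set String :=
  let d : PySem.Dict String Int := PySem.Dict.mk p.2
  let known : PySem.Set String := PySem.Set.update st.2 d.keys
  (known.foldl
      (fun r k =>
        r.modify k (List.replicate p.1.toNat (none : Option Int)) (fun v => v ++ [d.get? k]))
      st.1,
   known)

def pylist_to_pydict (pylist : List (List (String × Int))) : List (String × List (Option Int)) :=
  (((PySem.List.enumerate pylist 0).foldl stepA
      ((PySem.Dict.empty : PySem.Dict String (List (Option Int))),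
       (PySem.Set.empty : PySem.Set String))).1).items

-- ===== PORT B =====
-- keys = dict.fromkeys(k for d in pylist for k in d); then a dict comprehension of columns.
def pylist_to_pydict_alt (pylist : List (List (String × Int))) : List (String × List (Option Int)) :=
  let keys := PySem.List.dedup (pylist.flatMap (fun d => (PySem.Dict.mk d).keys))
  keys.map (fun k => (k, pylist.map (fun d => (PySem.Dict.mk d).get? k)))

-- ===== PRECONDITION & SPEC =====
def Spec_pylist_to_pydict (pylist : List (List (String × Int))) (out : List (String × List (Option Int))) : Prop := out = pylist_to_pydict_alt pylist
instance (pylist : List (List (String × Int))) (out : List (String × List (Option Int))) : Decidable (Spec_pylist_to_pydict pylist out) := by unfold Spec_pylist_to_pydict; infer_instance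

-- ===== CLAIM (what is proved, stated in full; the proofs are below) =====
def Claim_equal_pylist_to_pydict : Prop := ∀ (pylist : List (List (String × Int))), Dom_pylist_to_pydict pylist → Spec_pylist_to_pydict pylist (pylist_to_pydict pylist)

-- ===== LEMMAS AND PROOFS =====

-- the concatenation of all row keys, and the column of a key
def allKeys (rows : List (List (String × Int))) : List String :=
  rows.flatMap (fun d => (PySem.Dict.mk d).keys)

def colA (rows : List (List (String × Int))) (k : String) : List (Option Int) :=
  rows.map (fun d => (PySem.Dict.mk d).get? k)

lemma allKeys_append (rows : List (List (String × Int))) (r : List (String × Int)) :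
    allKeys (rows ++ [r]) = allKeys rows ++ (PySem.Dict.mk r).keys := by
  simp [allKeys]

lemma colA_append (rows : List (List (String × Int))) (r : List (String × Int)) (k : String) :
    colA (rows ++ [r]) k = colA rows k ++ [(PySem.Dict.mk r).get? k] := by
  simp [colA]

lemma colA_of_not_mem (rows : List (List (String × Int))) (k : String)
    (h : k ∉ allKeys rows) : colA rows k = List.replicate rows.length none := by
  induction rows with
  | nil => simp [colA]
  | cons d rows ih =>
    simp only [allKeys, List.flatMap_cons, List.mem_append] at h
    push Not at h
    simp only [colA, List.map_cons, List.length_cons, List.replicate_succ]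
    rw [(PySem.Dict.get?_eq_none_iff_not_mem_keys (PySem.Dict.mk d) k).mpr h.1]
    have := ih (by simpa [allKeys] using h.2)
    simpa [colA] using this

-- Set.update facts specific to this proof
lemma update_of_subset (l : List String) (s : PySem.Set String)
    (h : ∀ x ∈ l, x ∈ s) : PySem.Set.update s l = s := by
  induction l generalizing s with
  | nil => simp [PySem.Set.update_nil]
  | cons x l ih =>
    rw [PySem.Set.update_cons, PySem.Set.add_of_mem (h x (by simp))]
    exact ih s (fun y hy => h y (by simp [hy]))

lemma update_of_disjoint (e : List String) (s : PySem.Set String)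
    (hnd : e.Nodup) (hdis : ∀ x ∈ e, x ∉ s) : PySem.Set.update s e = s ++ e := by
  induction e generalizing s with
  | nil => simp [PySem.Set.update_nil]
  | cons x e ih =>
    rw [PySem.Set.update_cons, PySem.Set.add_of_not_mem (hdis x (by simp))]
    rw [ih (s ++ [x]) hnd.of_cons]
    · simp
    · intro y hy
      simp only [List.mem_append, List.mem_singleton]
      push Not
      exact ⟨hdis y (by simp [hy]), fun hyx => (List.nodup_cons.mp hnd).1 (hyx ▸ hy)⟩

lemma update_eq_append (l : List String) (s : PySem.Set String) :
    ∃ e : List String, PySem.Set.update s l = s ++ e ∧ e.Nodup ∧ ∀ x ∈ e, x ∉ s := by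
  induction l generalizing s with
  | nil => exact ⟨[], by simp [PySem.Set.update_nil], by simp, by simp⟩
  | cons x l ih =>
    rw [PySem.Set.update_cons]
    by_cases hx : x ∈ s
    · rw [PySem.Set.add_of_mem hx]; exact ih s
    · rw [PySem.Set.add_of_not_mem hx]
      obtain ⟨e, he, hnd, hdis⟩ := ih (s ++ [x])
      refine ⟨x :: e, by simpa using he, ?_, ?_⟩
      · exact List.nodup_cons.mpr ⟨fun hxe => by simpa using (hdis x hxe), hnd⟩
      · intro y hy
        rcases List.mem_cons.mp hy with h | h
        · exact h ▸ hx
        · intro hys; exact hdis y h (by simp [hys])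

lemma update_idem (s : PySem.Set String) (l : List String) :
    PySem.Set.update s (PySem.Set.update s l) = PySem.Set.update s l := by
  obtain ⟨e, he, hnd, hdis⟩ := update_eq_append l s
  rw [he, PySem.Set.update_append, update_of_subset s s (fun x hx => hx),
      update_of_disjoint e s hnd hdis]

-- get? through Dict.modify (derived from the getD / contains lemmas)
lemma get?_modify_of_ne' (d : PySem.Dict String (List (Option Int))) (k k' : String)
    (d0 : List (Option Int)) (f : List (Option Int) → List (Option Int)) (h : k' ≠ k) :
    (d.modify k d0 f).get? k' = d.get? k' := by
  cases h1 : d.get? k' with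
  | none =>
    have hc : d.contains k' = false := by
      rw [PySem.Dict.contains_eq_isSome_get?, h1]; rfl
    have hc2 : (d.modify k d0 f).contains k' = false := by
      rw [PySem.Dict.contains_modify, hc]
      simp [h]
    rw [PySem.Dict.contains_eq_isSome_get?] at hc2
    cases h2 : (d.modify k d0 f).get? k' with
    | none => rfl
    | some w => rw [h2] at hc2; simp at hc2
  | some v =>
    have hc : d.contains k' = true := by
      rw [PySem.Dict.contains_eq_isSome_get?, h1]; rfl
    have hc2 : (d.modify k d0 f).contains k' = true := by
      rw [PySem.Dict.contains_modify, hc]; simp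
    rw [PySem.Dict.contains_eq_isSome_get?] at hc2
    cases h2 : (d.modify k d0 f).get? k' with
    | none => rw [h2] at hc2; simp at hc2
    | some w =>
      have e1 : (d.modify k d0 f).getD k' d0 = d.getD k' d0 :=
        PySem.Dict.getD_modify_of_ne d d0 f h
      rw [PySem.Dict.getD_eq_get?_getD, PySem.Dict.getD_eq_get?_getD, h1, h2] at e1
      simpa using congrArg some e1
  
lemma get?_modify_self' (d : PySem.Dict String (List (Option Int))) (k : String)
    (d0 : List (Option Int)) (f : List (Option Int) → List (Option Int)) :
    (d.modify k d0 f).get? k = some (f (d.getD k d0)) := by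
  have hc2 : (d.modify k d0 f).contains k = true := by
    rw [PySem.Dict.contains_modify]; simp
  rw [PySem.Dict.contains_eq_isSome_get?] at hc2
  cases h2 : (d.modify k d0 f).get? k with
  | none => rw [h2] at hc2; simp at hc2
  | some w =>
    have e1 : (d.modify k d0 f).getD k d0 = f (d.getD k d0) :=
      PySem.Dict.getD_modify_self d k d0 f
    rw [PySem.Dict.getD_eq_get?_getD, h2] at e1
    simpa using congrArg some e1

-- the inner 'for k in known_keys' fold, read back through get?
lemma fold_modify_get?_not_mem (ks : List String)
    (R : PySem.Dict String (List (Option Int))) (dfl : List (Option Int))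
    (g : String → Option Int) (k : String) (hk : k ∉ ks) :
    (ks.foldl (fun r x => r.modify x dfl (fun v => v ++ [g x])) R).get? k = R.get? k := by
  induction ks generalizing R with
  | nil => rfl
  | cons x ks ih =>
    simp only [List.foldl_cons]
    rw [ih _ (fun h => hk (by simp [h]))]
    exact get?_modify_of_ne' R x k dfl _ (fun h => hk (by simp [h]))

lemma fold_modify_get?_mem (ks : List String)
    (R : PySem.Dict String (List (Option Int))) (dfl : List (Option Int))
    (g : String → Option Int) (k : String) (hnd : ks.Nodup) (hk : k ∈ ks) :
    (ks.foldl (fun r x => r.modify x dfl (fun v => v ++ [g x])) R).get? k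
      = some (R.getD k dfl ++ [g k]) := by
  induction ks generalizing R with
  | nil => simp at hk
  | cons x ks ih =>
    simp only [List.foldl_cons]
    by_cases hkx : k = x
    · subst hkx
      rw [fold_modify_get?_not_mem ks _ dfl g k (List.nodup_cons.mp hnd).1]
      exact get?_modify_self' R k dfl _
    · rw [ih _ (List.nodup_cons.mp hnd).2 (by rcases List.mem_cons.mp hk with h | h; exact absurd h hkx; exact h)]
      rw [PySem.Dict.getD_modify_of_ne R dfl _ hkx]

-- the loop invariant of A's outer fold
lemma invA (rows : List (List (String × Int))) :
    (((PySem.List.enumerate rows 0).foldl stepA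
        ((PySem.Dict.empty : PySem.Dict String (List (Option Int))),
         (PySem.Set.empty : PySem.Set String)))).2 = PySem.Set.ofList (allKeys rows)
    ∧ (((PySem.List.enumerate rows 0).foldl stepA
        ((PySem.Dict.empty : PySem.Dict String (List (Option Int))),
         (PySem.Set.empty : PySem.Set String)))).1.keys = PySem.Set.ofList (allKeys rows)
    ∧ ∀ k ∈ PySem.Set.ofList (allKeys rows),
        (((PySem.List.enumerate rows 0).foldl stepA
          ((PySem.Dict.empty : PySem.Dict String (List (Option Int))),
           (PySem.Set.empty : PySem.Set String)))).1.get? k = some (colA rows k) := by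
  induction rows using List.reverseRecOn with
  | nil =>
    refine ⟨rfl, rfl, ?_⟩
    intro k hk
    simp [allKeys, PySem.Set.ofList_nil] at hk
  | append_singleton rows r ih =>
    obtain ⟨ih2, ihk, ihg⟩ := ih
    rw [PySem.List.enumerate_append, List.foldl_append]
    simp only [PySem.List.enumerate_cons, PySem.List.enumerate_nil, List.foldl_cons, List.foldl_nil]
    set st := ((PySem.List.enumerate rows 0).foldl stepA
        ((PySem.Dict.empty : PySem.Dict String (List (Option Int))),
         (PySem.Set.empty : PySem.Set String))) with hst
    set K := PySem.Set.ofList (allKeys rows) with hK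
    have hKnd : K.Nodup := PySem.Set.nodup_ofList _
    set known' : PySem.Set String := PySem.Set.update K ((PySem.Dict.mk r).keys) with hknown
    have hknew : PySem.Set.ofList (allKeys (rows ++ [r])) = known' := by
      rw [allKeys_append, PySem.Set.ofList_append]
    have hstep2 : (stepA st ((0 : Int) + rows.length, r)).2 = known' := by
      simp only [stepA, ih2]; rfl
    have hnd' : known'.Nodup := PySem.Set.nodup_update _ _ hKnd
    have hstep1 : (stepA st ((0 : Int) + rows.length, r)).1
        = known'.foldl
            (fun rr k => rr.modify k (List.replicate (((0 : Int) + rows.length)).toNat none)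
              (fun v => v ++ [(PySem.Dict.mk r).get? k])) st.1 := by
      simp only [stepA, ih2]; rfl
    have hrepl : (((0 : Int) + rows.length)).toNat = rows.length := by
      simp
    refine ⟨by rw [hknew, hstep2], ?_, ?_⟩
    · rw [hknew, hstep1,
        PySem.Dict.keys_foldl_modify known' _ (fun _ x => (fun v => v ++ [(PySem.Dict.mk r).get? x])) st.1,
        ihk]
      exact update_idem K _
    · intro k hk
      rw [hknew] at hk
      rw [hstep1, fold_modify_get?_mem known' st.1 _ _ k hnd' hk, hrepl]
      by_cases hkK : k ∈ K
      · rw [PySem.Dict.getD_eq_get?_getD, ihg k hkK, colA_append]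
        rfl
      · have hget : st.1.get? k = none := by
          rw [PySem.Dict.get?_eq_none_iff_not_mem_keys, ihk]
          exact hkK
        rw [PySem.Dict.getD_eq_get?_getD, hget, colA_append,
          colA_of_not_mem rows k (fun h => hkK (by rw [hK]; exact (PySem.Set.mem_ofList _ _).mpr h))]
        rfl

-- ===== VERDICT (by name: the statement is the Claim_ definition above) =====
theorem pylist_to_pydict_spec : Claim_equal_pylist_to_pydict := by
  intro pylist _
  unfold Spec_pylist_to_pydict pylist_to_pydict pylist_to_pydict_alt
  obtain ⟨h2, hk, hg⟩ := invA pylist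
  rw [PySem.Dict.items_eq_map_keys _ (by rw [hk]; exact PySem.Set.nodup_ofList _) [], hk,
    PySem.List.dedup_eq_ofList]
  apply List.map_congr_left
  intro k hkmem
  have := hg k hkmem
  rw [PySem.Dict.getD_eq_get?_getD, this]
  rfl
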